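-- pv_equiv track=rewrite | github.com/roomi-fields/bp2sc | src/bp2sc/note_converter.py | detect_convention
-- ===== SOURCE A (Python) =====
-- def detect_convention(names: list[str]) -> str:
--     """Detect the naming convention from a list of note names.
--
--     Returns: "french", "indian", "anglo", or "unknown"
--     """
--     lower_names = {n.lower() for n in names}
--
--     # Check for distinctly French names
--     french_only = {"do", "sol", "si", "sib", "fa"}
--     if lower_names & french_only:
--         return "french"
--
--     # Check for distinctly Indian names
--     indian_only = {"sa", "ga", "ma", "pa", "dha", "ni"}
--     if lower_names & indian_only:
--         return "indian"
--
--     # Check for Anglo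
--     anglo_names = {n for n in names if n[0:1].isupper()}
--     if anglo_names:
--         return "anglo"
--
--     return "unknown"
-- ===== SOURCE B (Python) =====
-- def detect_convention(names: list[str]) -> str:
--     """Detect the naming convention from a list of note names.
--
--     Classify each name to a numeric priority rank via one lookup table,
--     then the answer is the table entry for the minimum rank seen.
--     """
--     RANK = {"do": 0, "sol": 0, "si": 0, "sib": 0, "fa": 0,
--             "sa": 1, "ga": 1, "ma": 1, "pa": 1, "dha": 1, "ni": 1}
--     LABELS = ("french", "indian", "anglo", "unknown")
--     best = min((RANK.get(n.lower(), 2 if n[0:1].isupper() else 3) for n in names),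
--                default=3)
--     return LABELS[best]
-- ===== Notes on version B (the rewrite author's own statement) =====
-- stated objective: alternative
-- what changed: Replaced A's three set constructions/intersections with early returns by classifying each name to a numeric priority rank through one lookup table, taking min() of the ranks, and decoding the minimum through a label table.
import Mathlib
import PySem

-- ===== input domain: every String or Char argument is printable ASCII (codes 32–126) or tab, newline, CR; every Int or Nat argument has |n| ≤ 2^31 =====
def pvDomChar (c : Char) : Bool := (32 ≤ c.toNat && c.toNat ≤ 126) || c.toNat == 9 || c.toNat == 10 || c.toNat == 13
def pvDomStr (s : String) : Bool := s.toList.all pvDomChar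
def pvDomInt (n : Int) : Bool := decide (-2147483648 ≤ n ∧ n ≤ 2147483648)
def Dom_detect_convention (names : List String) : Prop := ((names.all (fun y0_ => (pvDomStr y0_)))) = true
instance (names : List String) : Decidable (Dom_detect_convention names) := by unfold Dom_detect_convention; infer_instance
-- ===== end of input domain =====

-- B replaces A's three set constructions/intersections and early-return chain by a
-- per-name numeric-priority classification through one lookup table, a min() aggregation,
-- and a table decode of the minimum rank (objective: alternative decomposition, same cost).


-- shared primitive used verbatim by both Pythons: n[0:1].isupper().
-- Hand port, exact on the ASCII domain: empty slice → False; a one-char string is upper iff the char is A–Z.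
def pyFirstUpper (n : String) : Bool :=
  match n.toList with
  | [] => false
  | c :: _ => PySem.Chars.isupper c

-- ===== PORT A =====
def detect_convention (names : List String) : String :=
  let lower_names : PySem.Set String := PySem.Set.ofList (names.map PySem.Str.lower)
  let french_only : PySem.Set String := PySem.Set.ofList ["do", "sol", "si", "sib", "fa"]
  if PySem.Set.inter lower_names french_only ≠ [] then "french"
  else
    let indian_only : PySem.Set String := PySem.Set.ofList ["sa", "ga", "ma", "pa", "dha", "ni"]
    if PySem.Set.inter lower_names indian_only ≠ [] then "indian"
    else
      let anglo_names : PySem.Set String := PySem.Set.ofList (names.filter (fun n => pyFirstUpper n))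
      if anglo_names ≠ [] then "anglo"
      else "unknown"

-- ===== PORT B =====
-- RANK = {"do": 0, ..., "ni": 1}
def pvRankDict : PySem.Dict String Nat :=
  PySem.Dict.ofList [("do",0),("sol",0),("si",0),("sib",0),("fa",0),
                     ("sa",1),("ga",1),("ma",1),("pa",1),("dha",1),("ni",1)]

-- RANK.get(n.lower(), 2 if n[0:1].isupper() else 3)
def pvRank (n : String) : Nat :=
  pvRankDict.getD (PySem.Str.lower n) (if pyFirstUpper n then 2 else 3)

def detect_convention_alt (names : List String) : String :=
  let best : Nat := PySem.List.minD (names.map pvRank) (fun x => x) 3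
  -- LABELS[best]: best is always in range 0..3, so the total indexing form is exact here
  PySem.List.pyGetD ["french", "indian", "anglo", "unknown"] (best : Int) "unknown"

-- ===== PRECONDITION & SPEC =====
def Spec_detect_convention (names : List String) (out : String) : Prop := out = detect_convention_alt names
instance (names : List String) (out : String) : Decidable (Spec_detect_convention names out) := by unfold Spec_detect_convention; infer_instance

-- ===== CLAIM (what is proved, stated in full; the proofs are below) =====
def Claim_equal_detect_convention : Prop := ∀ (names : List String), Dom_detect_convention names → Spec_detect_convention names (detect_convention names)

-- ===== LEMMAS AND PROOFS =====

-- A's set intersection is nonempty iff some name satisfies the membership test.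
theorem inter_ne_nil_iff (l s : List String) :
    PySem.Set.inter (PySem.Set.ofList l) s ≠ [] ↔ ∃ x ∈ l, x ∈ s := by
  constructor
  · intro h
    rcases List.exists_mem_of_ne_nil _ h with ⟨x, hx⟩
    rw [PySem.Set.mem_inter, PySem.Set.mem_ofList] at hx
    exact ⟨x, hx⟩
  · rintro ⟨x, hxl, hxs⟩ hnil
    have : x ∈ PySem.Set.inter (PySem.Set.ofList l) s := by
      rw [PySem.Set.mem_inter, PySem.Set.mem_ofList]; exact ⟨hxl, hxs⟩
    simp [hnil] at this

theorem ofList_filter_ne_nil_iff (l : List String) (p : String → Bool) :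
    PySem.Set.ofList (l.filter p) ≠ [] ↔ ∃ x ∈ l, p x := by
  constructor
  · intro h
    rcases List.exists_mem_of_ne_nil _ h with ⟨x, hx⟩
    rw [PySem.Set.mem_ofList, List.mem_filter] at hx
    exact ⟨x, hx.1, hx.2⟩
  · rintro ⟨x, hxl, hpx⟩ hnil
    have : x ∈ PySem.Set.ofList (l.filter p) := by
      rw [PySem.Set.mem_ofList, List.mem_filter]; exact ⟨hxl, hpx⟩
    simp [hnil] at this

-- B's lookup table, characterised for an arbitrary key.
set_option maxHeartbeats 2000000 in
set_option maxRecDepth 8192 in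
theorem getD_rankDict (s : String) (d : Nat) :
    pvRankDict.getD s d =
      if s ∈ (["do","sol","si","sib","fa"] : List String) then 0
      else if s ∈ (["sa","ga","ma","pa","dha","ni"] : List String) then 1
      else d := by
  have h : pvRankDict = PySem.Dict.mk [("do",0),("sol",0),("si",0),("sib",0),("fa",0),
      ("sa",1),("ga",1),("ma",1),("pa",1),("dha",1),("ni",1)] := by decide
  rw [h]
  simp only [PySem.Dict.getD, PySem.Dict.get?_mk_cons]
  split_ifs <;> simp_all only [beq_iff_eq] <;> subst_vars <;> simp_all [PySem.Dict.get?] <;> tauto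

theorem pvRank_eq (n : String) :
    pvRank n =
      if PySem.Str.lower n ∈ (["do","sol","si","sib","fa"] : List String) then 0
      else if PySem.Str.lower n ∈ (["sa","ga","ma","pa","dha","ni"] : List String) then 1
      else if pyFirstUpper n then 2 else 3 := by
  unfold pvRank
  rw [getD_rankDict]


-- B's aggregated minimum rank, characterised by the three existential conditions.
theorem minRank_eq (names : List String) :
    PySem.List.minD (names.map pvRank) (fun x => x) 3 =
      if ∃ n ∈ names, PySem.Str.lower n ∈ (["do","sol","si","sib","fa"] : List String) then 0
      else if ∃ n ∈ names, PySem.Str.lower n ∈ (["sa","ga","ma","pa","dha","ni"] : List String) then 1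
      else if ∃ n ∈ names, pyFirstUpper n = true then 2
      else 3 := by
  have hdisj : ∀ s : String, s ∈ (["sa","ga","ma","pa","dha","ni"] : List String) →
      s ∉ (["do","sol","si","sib","fa"] : List String) := by
    intro s hs; fin_cases hs <;> decide
  unfold PySem.List.minD
  cases h : PySem.List.min? (names.map pvRank) (fun x => x) with
  | none =>
      have : names.map pvRank = [] := (PySem.List.min?_eq_none_iff _ _).1 h
      have hnil : names = [] := by simpa using this
      subst hnil
      simp
  | some m =>
      have hmem : m ∈ names.map pvRank := PySem.List.min?_mem h
      have hmin : ∀ y ∈ names.map pvRank, m ≤ y := by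
        intro y hy; exact PySem.List.min?_isMin h y hy
      rcases List.mem_map.1 hmem with ⟨n1, hn1, hr1⟩
      simp only [Option.getD_some]
      split_ifs with hF hI hA
      · rcases hF with ⟨n, hn, hlow⟩
        have h0 : pvRank n = 0 := by rw [pvRank_eq]; simp [hlow]
        have := hmin (pvRank n) (List.mem_map.2 ⟨n, hn, rfl⟩)
        omega
      · rcases hI with ⟨n, hn, hlow⟩
        have h1 : pvRank n = 1 := by
          rw [pvRank_eq]; simp [hlow, hdisj _ hlow]
        have hle := hmin (pvRank n) (List.mem_map.2 ⟨n, hn, rfl⟩)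
        have hne0 : pvRank n1 ≠ 0 := by
          rw [pvRank_eq]; split_ifs with c1 c2 c3 <;> try omega
          exact absurd ⟨n1, hn1, c1⟩ hF
        omega
      · rcases hA with ⟨n, hn, hup⟩
        have h2 : pvRank n = 2 := by
          rw [pvRank_eq]
          have c1 : PySem.Str.lower n ∉ (["do","sol","si","sib","fa"] : List String) :=
            fun c => hF ⟨n, hn, c⟩
          have c2 : PySem.Str.lower n ∉ (["sa","ga","ma","pa","dha","ni"] : List String) :=
            fun c => hI ⟨n, hn, c⟩
          simp [c1, c2, hup]
        have hle := hmin (pvRank n) (List.mem_map.2 ⟨n, hn, rfl⟩)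
        have hge : 2 ≤ pvRank n1 := by
          rw [pvRank_eq]; split_ifs with c1 c2 <;> try omega
          · exact absurd ⟨n1, hn1, c1⟩ hF
          · exact absurd ⟨n1, hn1, c2⟩ hI
        omega
      · have h3 : pvRank n1 = 3 := by
          rw [pvRank_eq]; split_ifs with c1 c2 c3
          · exact absurd ⟨n1, hn1, c1⟩ hF
          · exact absurd ⟨n1, hn1, c2⟩ hI
          · exact absurd ⟨n1, hn1, c3⟩ hA
          · rfl
        omega

-- A's intersection test, phrased as the same existential B's minimum is characterised by.
theorem interA_iff (names : List String) (s : List String) :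
    PySem.Set.inter (PySem.Set.ofList (names.map PySem.Str.lower)) (PySem.Set.ofList s) ≠ [] ↔
      ∃ n ∈ names, PySem.Str.lower n ∈ s := by
  rw [inter_ne_nil_iff]
  constructor
  · rintro ⟨x, hx, hxs⟩
    rcases List.mem_map.1 hx with ⟨n, hn, rfl⟩
    exact ⟨n, hn, (PySem.Set.mem_ofList _ _).1 hxs⟩
  · rintro ⟨n, hn, hns⟩
    exact ⟨PySem.Str.lower n, List.mem_map.2 ⟨n, hn, rfl⟩, (PySem.Set.mem_ofList _ _).2 hns⟩

-- ===== VERDICT (by name: the statement is the Claim_ definition above) =====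
theorem detect_convention_spec : Claim_equal_detect_convention := by
  intro names _
  unfold Spec_detect_convention detect_convention detect_convention_alt
  simp only [minRank_eq, interA_iff, ofList_filter_ne_nil_iff]
  by_cases hF : ∃ n ∈ names, PySem.Str.lower n ∈ (["do","sol","si","sib","fa"] : List String) <;>
  by_cases hI : ∃ n ∈ names, PySem.Str.lower n ∈ (["sa","ga","ma","pa","dha","ni"] : List String) <;>
  by_cases hA : ∃ n ∈ names, pyFirstUpper n = true <;>
  simp only [hF, hI, hA, if_true, if_false, iff_true, iff_false,
             not_false_eq_true, not_true_eq_false] <;>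
  simp [hF, hI, hA, PySem.List.pyGetD]
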